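-- pv_equiv track=rewrite | github.com/jag-k/tiktok-downloader | app/utils/notify/generate_schemas.py | generate_md_table
-- ===== SOURCE A (Python) =====
-- def generate_md_table(headers: list[str], data: list[list[str]]) -> str:
--     # Determine maximum length of values in each column
--     max_lengths = [len(str(header)) for header in headers]
--     for row in data:
--         for i, value in enumerate(row):
--             max_lengths[i] = max(max_lengths[i], len(str(value)))
--
--     # Generate table header
--     header_row = (
--         "| "
--         + " | ".join(
--             header.ljust(max_lengths[i]) for i, header in enumerate(headers)
--         )
--         + " |"
--     )
--     separator_row = (
--         "|"
--         + "-|".join("-" * (max_lengths[i] + 1) for i in range(len(headers)))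
--         + "-|"
--     )
--
--     # Generate table rows
--     data_rows = [
--         "| "
--         + " | ".join(
--             str(value).ljust(max_lengths[i]) for i, value in enumerate(row)
--         )
--         + " |"
--         for row in data
--     ]
--
--     # Combine header, separator, and data rows into final table
--     table = "\n".join([header_row, separator_row] + data_rows)
--
--     return table
-- ===== SOURCE B (Python) =====
-- def generate_md_table(headers: list[str], data: list[list[str]]) -> str:
--     # Column-major rendering: pre-render every column (header cell, separator
--     # cell, padded data cells), then read the rendered grid back to emit lines.
--     longest = max(map(len, data), default=0)  # columns past the longest row hold no data cells
--     hdr_cells, sep_cells, grid = [], [], []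
--     for i, header in enumerate(headers):
--         col = [row[i] if i < len(row) else None for row in data] if i < longest else []
--         width = max([len(header)] + [len(c) for c in col if c is not None])
--         hdr_cells.append(header.ljust(width))
--         sep_cells.append("-" * (width + 1))
--         grid.append([c.ljust(width) if c is not None else None for c in col])
--     lines = ["| " + " | ".join(hdr_cells) + " |",
--              "|" + "-|".join(sep_cells) + "-|"]
--     for j, row in enumerate(data):
--         lines.append("| " + " | ".join(grid[i][j] for i in range(len(row))) + " |")
--     return "\n".join(lines)
-- ===== Notes on version B (the rewrite author's own statement) =====
-- stated objective: alternative
-- what changed: B renders the table column-major: for each column it materializes the column's cells (None for rows too short to reach it, skipping columns past the longest row), computes that column's width, and pre-renders the padded header/separator/data cells into a grid, then emits each output line by reading the rendered grid back, instead of A's row-major running-max width array with ljust applied inside three separate row-building passes.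
import Mathlib
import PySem

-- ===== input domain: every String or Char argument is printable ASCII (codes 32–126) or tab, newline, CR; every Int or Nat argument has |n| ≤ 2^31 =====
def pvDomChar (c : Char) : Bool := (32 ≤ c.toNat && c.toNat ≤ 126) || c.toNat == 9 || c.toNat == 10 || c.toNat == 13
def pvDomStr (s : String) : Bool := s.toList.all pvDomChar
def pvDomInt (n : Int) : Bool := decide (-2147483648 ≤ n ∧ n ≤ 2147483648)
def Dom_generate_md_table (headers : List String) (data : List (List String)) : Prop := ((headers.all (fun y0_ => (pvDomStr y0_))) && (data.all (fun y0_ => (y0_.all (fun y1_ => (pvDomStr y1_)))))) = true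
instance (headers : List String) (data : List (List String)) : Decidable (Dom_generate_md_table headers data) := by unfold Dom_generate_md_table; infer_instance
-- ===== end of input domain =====

-- B builds the table by the transposed strategy: it renders each COLUMN in full and then
-- stitches the j-th cell of every column into output line j (objective: alternative).

-- ===== PORT A =====
-- len(value) on a str (str(value) is the identity on str)
def pvLen (s : String) : Nat := s.toList.length

-- value.ljust(w): pad right with spaces to width w
def pvLjust (cs : List Char) (w : Nat) : List Char := cs ++ List.replicate (w - cs.length) ' '

-- inner loop 'for i, value in enumerate(row): max_lengths[i] = max(max_lengths[i], len(value))';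
-- Python raises IndexError when i ≥ len(max_lengths) — those inputs are excluded by Pre_, the
-- port's set/getD are no-ops there.
def pvBumpRow (ml : List Nat) (row : List String) : List Nat :=
  (PySem.List.enumerate row).foldl
    (fun acc p => acc.set p.1.toNat (max (acc.getD p.1.toNat 0) (pvLen p.2))) ml

def generate_md_table (headers : List String) (data : List (List String)) : String :=
  let maxLengths := data.foldl pvBumpRow (headers.map pvLen)
  let headerRow : List Char :=
    ['|', ' ']
      ++ PySem.Chars.join (" | ".toList)
          ((PySem.List.enumerate headers).map (fun p => pvLjust p.2.toList (maxLengths.getD p.1.toNat 0)))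
      ++ [' ', '|']
  let separatorRow : List Char :=
    ['|']
      ++ PySem.Chars.join ['-', '|']
          ((List.range headers.length).map (fun i => List.replicate (maxLengths.getD i 0 + 1) '-'))
      ++ ['-', '|']
  let dataRows : List (List Char) :=
    data.map (fun row =>
      ['|', ' ']
        ++ PySem.Chars.join (" | ".toList)
            ((PySem.List.enumerate row).map (fun p => pvLjust p.2.toList (maxLengths.getD p.1.toNat 0)))
        ++ [' ', '|'])
  String.ofList (PySem.Chars.join ['\n'] ([headerRow, separatorRow] ++ dataRows))

-- ===== PORT B =====
-- longest = max(map(len, data), default=0)  (Python's max over Nat lengths = fold max 0)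
def pvLongest (data : List (List String)) : Nat :=
  (data.map List.length).foldl max 0

-- col = [row[i] if i < len(row) else None for row in data] if i < longest else []
def pvColOf (longest : Nat) (data : List (List String)) (i : Nat) : List (Option String) :=
  if i < longest then data.map (fun r => if i < r.length then some (r.getD i "") else none)
  else []

-- width = max([len(header)] + [len(c) for c in col if c is not None])  (max of a nonempty Nat list = fold max 0)
def pvWidth (longest : Nat) (data : List (List String)) (i : Nat) (h : String) : Nat :=
  (pvLen h :: ((pvColOf longest data i).filterMap id).map pvLen).foldl max 0

-- loop body: append this column's header cell, separator cell and padded data cells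
def pvRenderStep (longest : Nat) (data : List (List String))
    (st : List (List Char) × List (List Char) × List (List (Option (List Char))))
    (p : Int × String) :
    List (List Char) × List (List Char) × List (List (Option (List Char))) :=
  let i := p.1.toNat
  let w := pvWidth longest data i p.2
  (st.1 ++ [pvLjust p.2.toList w],
   st.2.1 ++ [List.replicate (w + 1) '-'],
   st.2.2 ++ [(pvColOf longest data i).map (Option.map (fun c => pvLjust c.toList w))])

def generate_md_table_alt (headers : List String) (data : List (List String)) : String :=
  let longest := pvLongest data
  let st := (PySem.List.enumerate headers).foldl (pvRenderStep longest data) ([], [], [])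
  -- grid[i][j] (in range under Pre_; the getD defaults are never read there)
  let lines :=
    (['|', ' '] ++ PySem.Chars.join (" | ".toList) st.1 ++ [' ', '|'])
      :: (['|'] ++ PySem.Chars.join ['-', '|'] st.2.1 ++ ['-', '|'])
      :: (PySem.List.enumerate data).map (fun q =>
            ['|', ' ']
              ++ PySem.Chars.join (" | ".toList)
                  ((List.range q.2.length).map (fun i =>
                    (((st.2.2.getD i []).getD q.1.toNat none).getD [])))
              ++ [' ', '|'])
  String.ofList (PySem.Chars.join ['\n'] lines)

-- ===== PRECONDITION & SPEC =====
-- A raises IndexError (max_lengths[i]) exactly when some row is longer than headers.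
def Pre_generate_md_table (headers : List String) (data : List (List String)) : Prop :=
  (data.all (fun row => row.length ≤ headers.length)) = true
instance (headers : List String) (data : List (List String)) : Decidable (Pre_generate_md_table headers data) := by unfold Pre_generate_md_table; infer_instance

def pvWitness_generate_md_table : List String × List (List String) :=
  (["name", "id"], [["alice", "1"], ["bo"]])

def Spec_generate_md_table (headers : List String) (data : List (List String)) (out : String) : Prop := out = generate_md_table_alt headers data
instance (headers : List String) (data : List (List String)) (out : String) : Decidable (Spec_generate_md_table headers data out) := by unfold Spec_generate_md_table; infer_instance

-- ===== CLAIM (what is proved, stated in full; the proofs are below) =====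
def Claim_equal_generate_md_table : Prop := ∀ (headers : List String) (data : List (List String)), Dom_generate_md_table headers data → Pre_generate_md_table headers data → Spec_generate_md_table headers data (generate_md_table headers data)

-- ===== LEMMAS AND PROOFS =====

-- the per-column fold step A's row-major running max reduces to
def pvColStep (k : Nat) (w : Nat) (r : List String) : Nat :=
  match r[k]? with | some c => max w (pvLen c) | none => w

-- the inner enumerate-fold with start s, read through getElem?
theorem pvBumpAux_getElem? (row : List String) (s : Nat) (ml : List Nat) (k : Nat)
    (hs : s + row.length ≤ ml.length) :
    ((PySem.List.enumerate row (s : Int)).foldl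
        (fun acc p => acc.set p.1.toNat (max (acc.getD p.1.toNat 0) (pvLen p.2))) ml)[k]?
      = if s ≤ k ∧ k < s + row.length
          then some (max (ml.getD k 0) (pvLen (row.getD (k - s) "")))
          else ml[k]? := by
  induction row generalizing s ml with
  | nil =>
      simp only [PySem.List.enumerate_nil, List.foldl_nil, List.length_nil] at *
      rw [if_neg (by omega)]
  | cons x xs ih =>
      rw [PySem.List.enumerate_cons, List.foldl_cons]
      have hcast : ((s : Int) + 1) = ((s + 1 : Nat) : Int) := by push_cast; ring
      have hsn : (s : Int).toNat = s := Int.toNat_natCast s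
      rw [hcast, hsn]
      have hlen : (ml.set s (max (ml.getD s 0) (pvLen x))).length = ml.length := by simp
      have hs' : (s + 1) + xs.length ≤ (ml.set s (max (ml.getD s 0) (pvLen x))).length := by
        simp only [hlen]; simp only [List.length_cons] at hs; omega
      rw [ih (s + 1) _ hs']
      by_cases hk : k = s
      · subst hk
        rw [if_neg (by omega), if_pos (by simp only [List.length_cons]; omega)]
        rw [List.getElem?_set]
        simp only [List.length_cons] at hs
        rw [if_pos rfl, if_pos (by omega)]
        simp
      · have hgd : (ml.set s (max (ml.getD s 0) (pvLen x))).getD k 0 = ml.getD k 0 := by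
          simp [List.getD, Ne.symm hk]
        have hge : (ml.set s (max (ml.getD s 0) (pvLen x)))[k]? = ml[k]? := by
          rw [List.getElem?_set, if_neg (by omega)]
        rw [hgd, hge]
        by_cases hc : s + 1 ≤ k ∧ k < s + 1 + xs.length
        · rw [if_pos hc, if_pos (by simp only [List.length_cons]; omega)]
          have : k - s = (k - (s + 1)) + 1 := by omega
          rw [this, List.getD_cons_succ]
        · rw [if_neg hc, if_neg (by simp only [List.length_cons]; omega)]

theorem pvBump_getD (ml : List Nat) (row : List String) (k : Nat)
    (hrow : row.length ≤ ml.length) :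
    (pvBumpRow ml row).getD k 0 = pvColStep k (ml.getD k 0) row := by
  unfold pvBumpRow
  have h0 : ((0 : Nat) : Int) = (0 : Int) := rfl
  rw [List.getD, ← h0, pvBumpAux_getElem? row 0 ml k (by omega)]
  by_cases hc : k < row.length
  · rw [if_pos (by omega)]
    have h1 : row[k]? = some row[k] := List.getElem?_eq_getElem hc
    simp [pvColStep, h1, List.getD]
  · rw [if_neg (by omega)]
    have h1 : row[k]? = none := List.getElem?_eq_none (by omega)
    simp [pvColStep, h1, List.getD]

theorem pvBump_length (ml : List Nat) (row : List String) :
    (pvBumpRow ml row).length = ml.length := by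
  unfold pvBumpRow
  generalize PySem.List.enumerate row (0 : Int) = l
  induction l generalizing ml with
  | nil => rfl
  | cons p ps ih => rw [List.foldl_cons, ih]; simp

-- the row-major fold, read per column, is the column-major fold
theorem pvFold_getD (data : List (List String)) (ml : List Nat) (k : Nat)
    (hpre : ∀ row ∈ data, row.length ≤ ml.length) (hk : k < ml.length) :
    (data.foldl pvBumpRow ml).getD k 0 = data.foldl (pvColStep k) (ml.getD k 0) := by
  induction data generalizing ml with
  | nil => rfl
  | cons r rs ih =>
      rw [List.foldl_cons, List.foldl_cons]
      have hr : r.length ≤ ml.length := hpre r (by simp)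
      rw [ih (pvBumpRow ml r)
          (fun row hm => by rw [pvBump_length]; exact hpre row (by simp [hm]))
          (by rw [pvBump_length]; exact hk)]
      rw [pvBump_getD ml r k hr]

-- a map over range reading xs.getD is the map over enumerate
theorem pvRangeMap_enum {α : Type} (xs : List String) (g : Nat → String → α) :
    (List.range xs.length).map (fun i => g i (xs.getD i ""))
      = (PySem.List.enumerate xs).map (fun p => g p.1.toNat p.2) := by
  apply List.ext_getElem
  · simp [PySem.List.length_enumerate]
  · intro k h1 h2
    have hk : k < xs.length := by simpa using h1
    simp only [List.getElem_map, List.getElem_range, PySem.List.getElem_enumerate]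
    have ht : ((0 : Int) + k).toNat = k := by omega
    rw [ht, List.getD_eq_getElem xs "" hk]

-- Python's max(nonempty list) over Nat lengths is the fold
theorem pvLongest_le (data : List (List String)) (row : List String) (hm : row ∈ data) :
    row.length ≤ pvLongest data := by
  unfold pvLongest
  exact (PySem.List.le_foldl_max (data.map List.length) 0).2 row.length
    (List.mem_map_of_mem hm)

-- the filtered column read, folded with max, is the per-column fold step
theorem pvColFold (i : Nat) (data : List (List String)) (init : Nat) :
    ((data.filterMap (fun r => r[i]?)).map pvLen).foldl max init
      = data.foldl (pvColStep i) init := by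
  induction data generalizing init with
  | nil => rfl
  | cons r rs ih =>
      cases hr : r[i]? with
      | none => simp [hr, ih, pvColStep]
      | some c => simp [hr, ih, pvColStep]

theorem pvFoldColStep_absent (i : Nat) (data : List (List String)) (w : Nat)
    (h : ∀ r ∈ data, r.length ≤ i) : data.foldl (pvColStep i) w = w := by
  induction data generalizing w with
  | nil => rfl
  | cons r rs ih =>
      rw [List.foldl_cons]
      have hr : r[i]? = none := List.getElem?_eq_none (h r (by simp))
      rw [show pvColStep i w r = w by simp [pvColStep, hr]]
      exact ih w (fun r hm => h r (List.mem_cons_of_mem _ hm))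

-- B's per-column width is A's max_lengths entry
theorem pvWidth_eq (headers : List String) (data : List (List String)) (i : Nat)
    (hpre : ∀ row ∈ data, row.length ≤ headers.length) (hi : i < headers.length) :
    pvWidth (pvLongest data) data i (headers[i])
      = (data.foldl pvBumpRow (headers.map pvLen)).getD i 0 := by
  have hcommon : pvWidth (pvLongest data) data i (headers[i])
      = data.foldl (pvColStep i) (pvLen headers[i]) := by
    unfold pvWidth pvColOf
    by_cases hlt : i < pvLongest data
    · rw [if_pos hlt, List.foldl_cons, Nat.zero_max, List.filterMap_map,
          List.filterMap_congr (g := fun r => r[i]?) ?_]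
      · exact pvColFold i data (pvLen headers[i])
      · intro r _
        by_cases h : i < r.length
        · simp [Function.comp, h]
        · simp [Function.comp, h]
    · rw [if_neg hlt]
      simp only [List.filterMap_nil, List.map_nil, List.foldl_cons, List.foldl_nil, Nat.zero_max]
      exact (pvFoldColStep_absent i data (pvLen headers[i])
        (fun r hm => le_trans (pvLongest_le data r hm) (le_of_not_gt hlt))).symm
  rw [hcommon, pvFold_getD data _ i (fun row hm => by simpa using hpre row hm) (by simpa using hi)]
  congr 1
  rw [List.getD_eq_getElem _ _ (by simpa using hi)]
  simp

-- a fold appending one element to each of three accumulators is three maps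
theorem pvFoldTriple {α β γ δ : Type} (l : List α) (f : α → β) (g : α → γ) (h : α → δ)
    (as : List β) (bs : List γ) (cs : List δ) :
    l.foldl (fun st p => (st.1 ++ [f p], st.2.1 ++ [g p], st.2.2 ++ [h p])) (as, bs, cs)
      = (as ++ l.map f, bs ++ l.map g, cs ++ l.map h) := by
  induction l generalizing as bs cs with
  | nil => simp
  | cons x xs ih => simp [ih]

-- ===== VERDICT (by name: the statement is the Claim_ definition above) =====
theorem generate_md_table_spec : Claim_equal_generate_md_table := by
  intro headers data _ hpre0
  have hpre : ∀ row ∈ data, row.length ≤ headers.length := by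
    intro row hm
    have := List.all_eq_true.mp hpre0 row hm
    exact Nat.le_of_ble_eq_true (by simpa using this)
  unfold Spec_generate_md_table
  simp only [generate_md_table, generate_md_table_alt]
  have hstep : pvRenderStep (pvLongest data) data = (fun st p =>
      (st.1 ++ [pvLjust p.2.toList (pvWidth (pvLongest data) data p.1.toNat p.2)],
       st.2.1 ++ [List.replicate (pvWidth (pvLongest data) data p.1.toNat p.2 + 1) '-'],
       st.2.2 ++ [(pvColOf (pvLongest data) data p.1.toNat).map (Option.map (fun c =>
         pvLjust c.toList (pvWidth (pvLongest data) data p.1.toNat p.2)))])) := by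
    funext st p
    rfl
  rw [hstep, pvFoldTriple]
  simp only [List.nil_append]
  refine congrArg _ (congrArg _ ?_)
  refine List.ext_getElem (by simp [PySem.List.length_enumerate]) ?_
  intro j hj1 hj2
  match j, hj1 with
  | 0, _ =>
      simp only [List.cons_append, List.nil_append, List.getElem_cons_zero]
      have hc0 : (PySem.List.enumerate headers).map (fun p =>
            pvLjust p.2.toList (pvWidth (pvLongest data) data p.1.toNat p.2))
          = (PySem.List.enumerate headers).map (fun p =>
            pvLjust p.2.toList
              ((data.foldl pvBumpRow (headers.map pvLen)).getD p.1.toNat 0)) := by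
        refine List.ext_getElem (by simp) ?_
        intro k h1 h2
        have hk : k < headers.length := by simpa [PySem.List.length_enumerate] using h1
        simp only [List.getElem_map, PySem.List.getElem_enumerate]
        have ht : ((0 : Int) + k).toNat = k := by omega
        rw [ht, pvWidth_eq headers data k hpre hk]
      rw [hc0]
  | 1, _ =>
      simp only [List.cons_append, List.nil_append, List.getElem_cons_succ,
        List.getElem_cons_zero]
      have hc1 : (PySem.List.enumerate headers).map (fun p =>
            List.replicate (pvWidth (pvLongest data) data p.1.toNat p.2 + 1) '-')
          = (List.range headers.length).map (fun i =>
            List.replicate ((data.foldl pvBumpRow (headers.map pvLen)).getD i 0 + 1) '-') := by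
        refine List.ext_getElem (by simp [PySem.List.length_enumerate]) ?_
        intro k h1 h2
        have hk : k < headers.length := by simpa using h2
        simp only [List.getElem_map, List.getElem_range, PySem.List.getElem_enumerate]
        have ht : ((0 : Int) + k).toNat = k := by omega
        rw [ht, pvWidth_eq headers data k hpre hk]
      rw [hc1]
  | (j + 2), hj =>
      have hjn : j < data.length := by
        simpa [PySem.List.length_enumerate] using hj
      simp only [List.cons_append, List.nil_append, List.getElem_cons_succ,
        List.getElem_map, PySem.List.getElem_enumerate]
      have htj : ((0 : Int) + j).toNat = j := by omega
      rw [htj]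
      have hcj : (List.range data[j].length).map (fun i =>
            ((((PySem.List.enumerate headers).map (fun p =>
                  (pvColOf (pvLongest data) data p.1.toNat).map (Option.map (fun c =>
                    pvLjust c.toList
                      (pvWidth (pvLongest data) data p.1.toNat p.2))))).getD i []).getD j
              none).getD [])
          = (PySem.List.enumerate data[j]).map (fun p =>
            pvLjust p.2.toList
              ((data.foldl pvBumpRow (headers.map pvLen)).getD p.1.toNat 0)) := by
        rw [← pvRangeMap_enum data[j] (fun i h =>
              pvLjust h.toList ((data.foldl pvBumpRow (headers.map pvLen)).getD i 0))]
        refine List.ext_getElem (by simp) ?_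
        intro k hk1 hk2
        have hkL : k < data[j].length := by simpa using hk1
        have hkH : k < headers.length := lt_of_lt_of_le hkL (hpre data[j] (by simp))
        have hkLong : k < pvLongest data :=
          lt_of_lt_of_le hkL (pvLongest_le data data[j] (by simp))
        simp only [List.getElem_map, List.getElem_range]
        rw [List.getD_eq_getElem _ []
              (by simpa [PySem.List.length_enumerate] using hkH),
            List.getElem_map, PySem.List.getElem_enumerate]
        have htk : ((0 : Int) + k).toNat = k := by omega
        rw [htk]
        unfold pvColOf
        rw [if_pos hkLong, List.map_map,
            List.getD_eq_getElem _ none (by simpa using hjn), List.getElem_map]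
        simp [Function.comp, hkL, pvWidth_eq headers data k hpre hkH]
      rw [hcj]
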